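-- pv_equiv track=rewrite | github.com/krystianjarmul/blackjack | game.py | _get_win_score
-- ===== SOURCE A (Python) =====
-- from typing import Set, List, Optional
--
-- def _get_win_score(scores: List[int]) -> int:
--     scores = scores.copy()
--     while True:
--         score = max(scores)
--         if score > 21:
--             scores.remove(score)
--         else:
--             break
--     return score
-- ===== SOURCE B (Python) =====
-- def _get_win_score(scores):
--     for score in sorted(scores, reverse=True):
--         if score <= 21:
--             return score
--     raise ValueError("max() arg is an empty sequence")
-- ===== Notes on version B (the rewrite author's own statement) =====
-- stated objective: faster
-- what changed: Replaces the destructive max-and-remove loop on a copied list with a single pass over the descending-sorted list returning the first score <= 21.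
import Mathlib
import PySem

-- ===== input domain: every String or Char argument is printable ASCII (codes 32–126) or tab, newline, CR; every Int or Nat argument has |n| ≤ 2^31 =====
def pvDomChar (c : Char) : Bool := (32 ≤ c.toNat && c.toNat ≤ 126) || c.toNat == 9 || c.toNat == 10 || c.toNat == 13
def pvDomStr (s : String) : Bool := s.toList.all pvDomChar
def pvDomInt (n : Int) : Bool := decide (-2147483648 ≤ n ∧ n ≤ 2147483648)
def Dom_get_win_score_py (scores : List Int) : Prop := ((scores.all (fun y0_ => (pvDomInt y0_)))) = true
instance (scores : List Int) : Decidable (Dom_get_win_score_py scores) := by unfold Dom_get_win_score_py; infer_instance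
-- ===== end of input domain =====

-- B replaces A's repeated max-and-remove scanning with one pass over the
-- descending-sorted list, returning the first score ≤ 21 (O(n log n) vs O(n^2); measured faster).
-- Both programs raise ValueError when no score qualifies; Pre_ excludes those inputs.

-- ===== PORT A =====
-- the while loop of A: max of the remaining list; if > 21, remove it and loop, else return it.
-- fuel = scores.length + 1 bounds the iterations (each removes one element); 0 is never returned under Pre_.
def getWinLoopA : Nat → List Int → Int
  | 0, _ => 0
  | n + 1, xs =>
    match PySem.List.max? xs (fun y => y) with
    | none => 0   -- max([]) raises ValueError in Python; unreachable under Pre_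
    | some score =>
      if score > 21 then getWinLoopA n ((PySem.List.remove? xs score).getD []) else score

def get_win_score_py (scores : List Int) : Int :=
  getWinLoopA (scores.length + 1) scores

-- ===== PORT B =====
-- the for loop of B: first element ≤ 21; falling off the end raises ValueError (unreachable under Pre_).
def findLeB : List Int → Int
  | [] => 0
  | x :: xs => if x ≤ 21 then x else findLeB xs

def get_win_score_py_alt (scores : List Int) : Int :=
  findLeB (PySem.List.sorted scores (fun y => y) true)

-- ===== PRECONDITION & SPEC =====
-- Pre_ excludes exactly the inputs where both A and B raise ValueError: no score ≤ 21.
def Pre_get_win_score_py (scores : List Int) : Prop := ∃ x ∈ scores, x ≤ 21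
instance (scores : List Int) : Decidable (Pre_get_win_score_py scores) := by
  unfold Pre_get_win_score_py; infer_instance

def pvWitness_get_win_score_py : List Int := [25, 18, 22, 7]

def Spec_get_win_score_py (scores : List Int) (out : Int) : Prop := out = get_win_score_py_alt scores
instance (scores : List Int) (out : Int) : Decidable (Spec_get_win_score_py scores out) := by
  unfold Spec_get_win_score_py; infer_instance

-- ===== CLAIM (what is proved, stated in full; the proofs are below) =====
def Claim_equal_get_win_score_py : Prop := ∀ (scores : List Int), Dom_get_win_score_py scores → Pre_get_win_score_py scores → Spec_get_win_score_py scores (get_win_score_py scores)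

-- ===== LEMMAS AND PROOFS =====

-- the common characterisation: the (value of the) maximum of the scores that are ≤ 21
def pvF (xs : List Int) : Option Int :=
  PySem.List.max? (xs.filter (fun x => decide (x ≤ 21))) (fun y => y)

theorem pvF_eq_some_iff_max {xs : List Int} {m : Int} :
    pvF xs = some m ↔ (m ∈ xs ∧ m ≤ 21 ∧ ∀ y ∈ xs, y ≤ 21 → y ≤ m) := by
  constructor
  · intro h
    have hmem := PySem.List.max?_mem h
    have hmax := PySem.List.max?_isMax h
    simp only [List.mem_filter, decide_eq_true_eq] at hmem hmax
    exact ⟨hmem.1, hmem.2, fun y hy hy21 => hmax y ⟨hy, hy21⟩⟩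
  · rintro ⟨hmem, h21, hmax⟩
    have hne : xs.filter (fun x => decide (x ≤ 21)) ≠ [] := by
      intro h
      have : m ∈ xs.filter (fun x => decide (x ≤ 21)) := by
        simp [List.mem_filter, hmem, h21]
      simp [h] at this
    have hne' : PySem.List.max? (xs.filter (fun x => decide (x ≤ 21))) (fun y : Int => y) ≠ none := by
      simp [PySem.List.max?_eq_none_iff, hne]
    rcases Option.ne_none_iff_exists'.mp hne' with ⟨m', hm'⟩
    have hmem' := PySem.List.max?_mem hm'
    have hmax' := PySem.List.max?_isMax hm'
    simp only [List.mem_filter, decide_eq_true_eq] at hmem'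
    have h1 : m' ≤ m := hmax m' hmem'.1 hmem'.2
    have h2 : m ≤ m' := by
      have : m ∈ xs.filter (fun x => decide (x ≤ 21)) := by
        simp [List.mem_filter, hmem, h21]
      exact hmax' m this
    have : m' = m := le_antisymm h1 h2
    rw [← this]; exact hm'

-- erasing an element > 21 does not change the ≤ 21 filter
theorem filter_erase_gt {xs : List Int} {a : Int} (ha : 21 < a) :
    (xs.erase a).filter (fun x => decide (x ≤ 21)) = xs.filter (fun x => decide (x ≤ 21)) := by
  induction xs with
  | nil => rfl
  | cons x t ih =>
    by_cases hx : x = a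
    · subst hx
      have : ¬ (x ≤ 21) := by omega
      simp [this]
    · have : (x == a) = false := by simp [hx]
      simp only [List.erase_cons, this]
      by_cases hx21 : x ≤ 21 <;> simp [hx21, ih]

-- A's loop returns the maximum qualifying score
theorem getWinLoopA_eq {m : Int} :
    ∀ (fuel : Nat) (xs : List Int), xs.length < fuel → pvF xs = some m →
      getWinLoopA fuel xs = m := by
  intro fuel
  induction fuel with
  | zero => intro xs h; omega
  | succ n ih =>
    intro xs hlen hF
    rcases (pvF_eq_some_iff_max.mp hF) with ⟨hmem, h21, hmax⟩
    have hne : xs ≠ [] := by intro h; subst h; simp at hmem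
    have : PySem.List.max? xs (fun y => y) ≠ none := by
      simp [PySem.List.max?_eq_none_iff, hne]
    rcases Option.ne_none_iff_exists'.mp this with ⟨mx, hmx⟩
    have hmxmem := PySem.List.max?_mem hmx
    have hmxmax := PySem.List.max?_isMax hmx
    simp only [getWinLoopA, hmx]
    by_cases hgt : mx > 21
    · simp only [if_pos hgt]
      have hrem := PySem.List.remove?_eq_some_erase _ _ hmxmem
      rw [hrem]
      simp only [Option.getD_some]
      refine ih (xs.erase mx) ?_ ?_
      · have := List.length_erase_of_mem hmxmem
        have hpos : 0 < xs.length := List.length_pos_of_mem hmxmem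
        omega
      · unfold pvF
        rw [filter_erase_gt hgt]
        exact hF
    · simp only [if_neg hgt]
      rw [not_lt] at hgt
      have h1 : mx ≤ m := hmax mx hmxmem hgt
      have h2 : m ≤ mx := hmxmax m hmem
      omega

-- B's scan over a descending-sorted list returns the maximum qualifying score
theorem findLeB_eq {m : Int} :
    ∀ (l : List Int), l.Pairwise (fun a b => b ≤ a) → pvF l = some m → findLeB l = m := by
  intro l
  induction l with
  | nil => intro _ h; simp [pvF, PySem.List.max?] at h
  | cons x t ih =>
    intro hpw hF
    rcases (pvF_eq_some_iff_max.mp hF) with ⟨hmem, h21, hmax⟩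
    have hpwt := (List.pairwise_cons.mp hpw).2
    have hle : ∀ y ∈ t, y ≤ x := (List.pairwise_cons.mp hpw).1
    by_cases hx : x ≤ 21
    · have h1 : m ≤ x := by
        rcases List.mem_cons.mp hmem with h | h
        · omega
        · exact hle m h
      have h2 : x ≤ m := hmax x (List.mem_cons_self) hx
      simp [findLeB, hx]; omega
    · simp only [findLeB, if_neg hx]
      apply ih hpwt
      unfold pvF at hF ⊢
      rw [List.filter_cons] at hF
      simpa [hx] using hF

-- pvF is determined by the multiset of elements
theorem pvF_perm {xs ys : List Int} (hp : xs.Perm ys) {m : Int} (h : pvF xs = some m) :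
    pvF ys = some m := by
  rcases pvF_eq_some_iff_max.mp h with ⟨hmem, h21, hmax⟩
  exact pvF_eq_some_iff_max.mpr
    ⟨hp.mem_iff.mp hmem, h21, fun y hy hy21 => hmax y (hp.mem_iff.mpr hy) hy21⟩

-- ===== VERDICT (by name: the statement is the Claim_ definition above) =====
theorem get_win_score_py_spec : Claim_equal_get_win_score_py := by
  intro scores _ hpre
  unfold Spec_get_win_score_py
  rcases hpre with ⟨x, hx, hx21⟩
  have hne : scores.filter (fun x => decide (x ≤ 21)) ≠ [] := by
    intro h
    have : x ∈ scores.filter (fun x => decide (x ≤ 21)) := by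
      simp [List.mem_filter, hx, hx21]
    simp [h] at this
  have : pvF scores ≠ none := by
    simp [pvF, PySem.List.max?_eq_none_iff, hne]
  rcases Option.ne_none_iff_exists'.mp this with ⟨m, hm⟩
  have hA : get_win_score_py scores = m :=
    getWinLoopA_eq (scores.length + 1) scores (by omega) hm
  have hperm : (PySem.List.sorted scores (fun y => y) true).Perm scores :=
    PySem.List.sorted_perm _ _ _
  have hB : get_win_score_py_alt scores = m :=
    findLeB_eq _ (PySem.List.sorted_pairwise_rev _ _) (pvF_perm hperm.symm hm)
  rw [hA, hB]
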